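-- pv_equiv track=rewrite | github.com/Boburz/ORKopoly | orkopoly.py | collect_problems
-- ===== SOURCE A (Python) =====
-- def collect_problems(has_gold, needs_gold, has_stone, needs_stone, has_energy, needs_energy, has_food, needs_food):
--     problems = []
--
--     # collect all the missing ressources
--     if needs_gold > has_gold:
--         problems.append(str(needs_gold-has_gold) + " more Gold")
--     if needs_stone > has_stone:
--         problems.append(str(needs_stone-has_stone) + " more Stone")
--     if needs_energy > has_energy:
--         problems.append(str(needs_energy-has_energy) + " more Energy")
--     if needs_food > has_food:
--         problems.append(str(needs_food-has_food) + " more Food")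
--
--     # if all ressources are available, we have no problems
--     if len(problems) == 0:
--         return ""
--
--     out_string = "Not enough ressources: You need "
--     while len(problems) > 0:
--         if len(problems) == 1:
--             out_string += problems[0] + "."
--         elif len(problems) == 2:
--             out_string += problems[0] + " and "
--         else:
--             out_string += problems[0] + ", "
--         del problems[0]
--
--     return out_string
-- ===== SOURCE B (Python) =====
-- def collect_problems(has_gold, needs_gold, has_stone, needs_stone, has_energy, needs_energy, has_food, needs_food):
--     problems = [str(need - have) + " more " + name
--                 for name, have, need in (("Gold", has_gold, needs_gold),
--                                          ("Stone", has_stone, needs_stone),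
--                                          ("Energy", has_energy, needs_energy),
--                                          ("Food", has_food, needs_food))
--                 if need > have]
--     if not problems:
--         return ""
--     if len(problems) == 1:
--         body = problems[0]
--     else:
--         body = ", ".join(problems[:-1]) + " and " + problems[-1]
--     return "Not enough ressources: You need " + body + "."
-- ===== Notes on version B (the rewrite author's own statement) =====
-- stated objective: idiomatic
-- what changed: Replaces the destructive while-loop that pops problems[0] while branching on the remaining count with a comprehension over (name, have, need) tuples and a single last-element-special-cased join of the list (', '.join of all but the last plus ' and ' plus the last).
import Mathlib
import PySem

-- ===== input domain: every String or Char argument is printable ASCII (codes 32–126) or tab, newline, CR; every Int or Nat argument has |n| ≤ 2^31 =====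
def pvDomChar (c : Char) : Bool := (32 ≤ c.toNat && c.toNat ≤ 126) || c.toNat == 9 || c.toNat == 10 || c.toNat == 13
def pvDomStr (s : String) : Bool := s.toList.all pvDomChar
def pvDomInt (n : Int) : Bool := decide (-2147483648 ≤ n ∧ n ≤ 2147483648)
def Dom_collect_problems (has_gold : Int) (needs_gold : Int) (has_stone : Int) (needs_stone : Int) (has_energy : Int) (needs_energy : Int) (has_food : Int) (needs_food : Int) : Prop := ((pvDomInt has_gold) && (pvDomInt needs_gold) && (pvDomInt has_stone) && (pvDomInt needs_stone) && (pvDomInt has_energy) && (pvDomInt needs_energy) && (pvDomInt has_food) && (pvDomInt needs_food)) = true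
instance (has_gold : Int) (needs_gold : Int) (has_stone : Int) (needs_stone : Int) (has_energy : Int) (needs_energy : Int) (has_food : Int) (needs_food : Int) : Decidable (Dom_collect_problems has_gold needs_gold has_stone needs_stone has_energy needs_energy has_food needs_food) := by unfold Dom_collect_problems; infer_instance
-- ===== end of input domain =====

-- ===== PORT A =====
-- B replaces A's pop-while-counting loop by a slice-based join (idiomatic); proofs below.
-- A's while loop over `problems` with `del problems[0]`: structural recursion on the list,
-- branching on the remaining length exactly as A does.
def collectLoopA (out : String) (ps : List String) : String :=
  match ps with
  | [] => out
  | p :: rest =>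
    let out :=
      if ps.length == 1 then out ++ (p ++ ".")
      else if ps.length == 2 then out ++ (p ++ " and ")
      else out ++ (p ++ ", ")
    collectLoopA out rest

def collect_problems (has_gold : Int) (needs_gold : Int) (has_stone : Int) (needs_stone : Int) (has_energy : Int) (needs_energy : Int) (has_food : Int) (needs_food : Int) : String :=
  let problems : List String := []
  let problems := if needs_gold > has_gold then problems ++ [PySem.Int.toStr (needs_gold - has_gold) ++ " more Gold"] else problems
  let problems := if needs_stone > has_stone then problems ++ [PySem.Int.toStr (needs_stone - has_stone) ++ " more Stone"] else problems
  let problems := if needs_energy > has_energy then problems ++ [PySem.Int.toStr (needs_energy - has_energy) ++ " more Energy"] else problems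
  let problems := if needs_food > has_food then problems ++ [PySem.Int.toStr (needs_food - has_food) ++ " more Food"] else problems
  if problems.length == 0 then ""
  else collectLoopA "Not enough ressources: You need " problems

-- ===== PORT B =====
-- Python's sep.join(xs), ported by hand (exact for any list of strings).
def joinSep (sep : String) : List String → String
  | [] => ""
  | [x] => x
  | x :: xs => x ++ sep ++ joinSep sep xs

def collect_problems_alt (has_gold : Int) (needs_gold : Int) (has_stone : Int) (needs_stone : Int) (has_energy : Int) (needs_energy : Int) (has_food : Int) (needs_food : Int) : String :=
  let problems : List String :=
    (([("Gold", has_gold, needs_gold), ("Stone", has_stone, needs_stone),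
       ("Energy", has_energy, needs_energy), ("Food", has_food, needs_food)].filter
        (fun t => t.2.2 > t.2.1)).map
      (fun t => PySem.Int.toStr (t.2.2 - t.2.1) ++ " more " ++ t.1))
  match problems with
  | [] => ""
  | ps =>
    let body :=
      if ps.length == 1 then ps.headD ""
      else joinSep ", " ps.dropLast ++ " and " ++ ps.getLastD ""
    "Not enough ressources: You need " ++ body ++ "."

-- ===== PRECONDITION & SPEC =====
def Spec_collect_problems (has_gold : Int) (needs_gold : Int) (has_stone : Int) (needs_stone : Int) (has_energy : Int) (needs_energy : Int) (has_food : Int) (needs_food : Int) (out : String) : Prop := out = collect_problems_alt has_gold needs_gold has_stone needs_stone has_energy needs_energy has_food needs_food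
instance (has_gold : Int) (needs_gold : Int) (has_stone : Int) (needs_stone : Int) (has_energy : Int) (needs_energy : Int) (has_food : Int) (needs_food : Int) (out : String) : Decidable (Spec_collect_problems has_gold needs_gold has_stone needs_stone has_energy needs_energy has_food needs_food out) := by unfold Spec_collect_problems; infer_instance

-- ===== CLAIM (what is proved, stated in full; the proofs are below) =====
def Claim_equal_collect_problems : Prop := ∀ (has_gold : Int) (needs_gold : Int) (has_stone : Int) (needs_stone : Int) (has_energy : Int) (needs_energy : Int) (has_food : Int) (needs_food : Int), Dom_collect_problems has_gold needs_gold has_stone needs_stone has_energy needs_energy has_food needs_food → Spec_collect_problems has_gold needs_gold has_stone needs_stone has_energy needs_energy has_food needs_food (collect_problems has_gold needs_gold has_stone needs_stone has_energy needs_energy has_food needs_food)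

-- ===== LEMMAS AND PROOFS =====

-- ===== VERDICT (by name: the statement is the Claim_ definition above) =====
theorem collect_problems_spec : Claim_equal_collect_problems := by
  intro hg ng hs ns he ne hf nf _
  unfold Spec_collect_problems collect_problems collect_problems_alt
  by_cases h1 : ng > hg <;> by_cases h2 : ns > hs <;> by_cases h3 : ne > he <;> by_cases h4 : nf > hf <;>
    simp [h1, h2, h3, h4, collectLoopA, joinSep, String.append_assoc]
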